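-- pv_equiv track=rewrite | github.com/Sema4AI/gallery | actions/payment-remittance-reconcile-action/reconciliation_ledger/db/db_setup_generator.py | _generate_facility_records
-- ===== SOURCE A (Python) =====
-- from typing import Dict, List, Optional, Tuple
--
-- def _generate_facility_records(invoices: List[Dict]) -> List[Dict]:
--     """Generate unique facility records from invoices."""
--     facilities_seen = set()
--     facility_records = []
--
--     for invoice in invoices:
--         facility_id = invoice["Facility ID"]
--         if facility_id not in facilities_seen:
--             facility_records.append(
--                 {
--                     "facility_id": facility_id,
--                     "facility_name": facility_id,
--                     "facility_type": invoice["Facility Type"],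
--                 }
--             )
--             facilities_seen.add(facility_id)
--
--     return facility_records
-- ===== SOURCE B (Python) =====
-- def _generate_facility_records(invoices):
--     """Generate unique facility records from invoices."""
--     # pass 1: facility ids in first-seen order
--     ids = list(dict.fromkeys(invoice["Facility ID"] for invoice in invoices))
--     # pass 2: first invoice per facility id (reversed comprehension: first occurrence wins)
--     first = {invoice["Facility ID"]: invoice for invoice in reversed(invoices)}
--     # pass 3: project the records
--     return [
--         {
--             "facility_id": fid,
--             "facility_name": fid,
--             "facility_type": first[fid]["Facility Type"],
--         }
--         for fid in ids
--     ]
-- ===== Notes on version B (the rewrite author's own statement) =====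
-- stated objective: alternative
-- what changed: Replaces A's single interleaved loop (seen-set guard + in-place record append) by three separate passes: an ordered dedup of the facility ids, a reversed dict comprehension picking each id's first invoice, and a projection comprehension building the records.
import Mathlib
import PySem

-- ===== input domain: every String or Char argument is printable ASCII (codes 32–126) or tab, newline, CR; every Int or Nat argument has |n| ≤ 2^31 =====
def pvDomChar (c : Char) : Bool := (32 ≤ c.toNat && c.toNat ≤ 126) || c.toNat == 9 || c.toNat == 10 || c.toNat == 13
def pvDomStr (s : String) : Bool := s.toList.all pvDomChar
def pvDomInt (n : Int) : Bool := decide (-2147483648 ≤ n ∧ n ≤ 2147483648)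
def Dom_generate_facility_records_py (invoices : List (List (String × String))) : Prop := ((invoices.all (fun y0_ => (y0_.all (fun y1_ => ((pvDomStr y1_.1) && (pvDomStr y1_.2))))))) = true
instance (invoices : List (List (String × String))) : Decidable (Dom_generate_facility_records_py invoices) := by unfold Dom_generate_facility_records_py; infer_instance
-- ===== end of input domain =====

-- B changes the decomposition only (three separate passes instead of one interleaved loop); same cost, same return value on all inputs where A returns.

-- shared helpers: invoice["Facility ID"] / invoice["Facility Type"] (first-match assoc lookup), and one output record
def pvFid? (inv : List (String × String)) : Option String := PySem.Dict.get? (PySem.Dict.mk inv) "Facility ID"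
def pvFidD (inv : List (String × String)) : String := (pvFid? inv).getD ""   -- total form; Pre_ guarantees the key is present
def pvType? (inv : List (String × String)) : Option String := PySem.Dict.get? (PySem.Dict.mk inv) "Facility Type"
def pvRecord (fid : String) (inv : List (String × String)) : List (String × String) :=
  [("facility_id", fid), ("facility_name", fid), ("facility_type", (pvType? inv).getD "")]   -- total form; Pre_ guarantees the key on first occurrences

-- ===== PORT A =====  (single loop: seen set + appended records)
def pvGoA (rest : List (List (String × String))) (seen : PySem.Set String) (acc : List (List (String × String))) : List (List (String × String)) :=
  match rest with
  | [] => acc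
  | inv :: t =>
    let fid := pvFidD inv
    if PySem.Set.contains seen fid then pvGoA t seen acc
    else pvGoA t (PySem.Set.add seen fid) (acc ++ [pvRecord fid inv])

def generate_facility_records_py (invoices : List (List (String × String))) : List (List (String × String)) :=
  pvGoA invoices PySem.Set.empty []

-- ===== PORT B =====  (three passes: ordered dedup of ids; reversed dict comprehension; projection)
def generate_facility_records_py_alt (invoices : List (List (String × String))) : List (List (String × String)) :=
  let ids := PySem.List.dedup (invoices.map pvFidD)
  let first := invoices.reverse.foldl (fun d inv => PySem.Dict.insert d (pvFidD inv) inv) PySem.Dict.empty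
  ids.map (fun fid => pvRecord fid (PySem.Dict.getD first fid []))

-- ===== PRECONDITION & SPEC =====
-- Pre_ excludes exactly the inputs where the Python A raises KeyError: an invoice without "Facility ID",
-- or an invoice that is the first occurrence of its facility id but has no "Facility Type".
def Pre_generate_facility_records_py (invoices : List (List (String × String))) : Prop :=
  ∀ i < invoices.length,
    (pvFid? (invoices.getD i [])).isSome = true ∧
    (pvFid? (invoices.getD i []) ∉ (invoices.take i).map pvFid? →
      (pvType? (invoices.getD i [])).isSome = true)
instance (invoices : List (List (String × String))) : Decidable (Pre_generate_facility_records_py invoices) := by unfold Pre_generate_facility_records_py; infer_instance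

def pvWitness_generate_facility_records_py : (List (List (String × String))) :=
  [[("Facility ID", "F1"), ("Facility Type", "Clinic")], [("Facility ID", "F1")]]

def Spec_generate_facility_records_py (invoices : List (List (String × String))) (out : List (List (String × String))) : Prop := out = generate_facility_records_py_alt invoices
instance (invoices : List (List (String × String))) (out : List (List (String × String))) : Decidable (Spec_generate_facility_records_py invoices out) := by unfold Spec_generate_facility_records_py; infer_instance

-- ===== CLAIM (what is proved, stated in full; the proofs are below) =====
def Claim_equal_generate_facility_records_py : Prop := ∀ (invoices : List (List (String × String))), Dom_generate_facility_records_py invoices → Pre_generate_facility_records_py invoices → Spec_generate_facility_records_py invoices (generate_facility_records_py invoices)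

-- ===== LEMMAS AND PROOFS =====

-- accumulator lemma for A's loop
theorem pvGoA_acc (rest : List (List (String × String))) (seen : PySem.Set String) (acc : List (List (String × String))) :
    pvGoA rest seen acc = acc ++ pvGoA rest seen [] := by
  induction rest generalizing seen acc with
  | nil => simp [pvGoA]
  | cons inv t ih =>
    simp only [pvGoA]
    split_ifs with h
    · exact ih seen acc
    · rw [ih (PySem.Set.add seen (pvFidD inv)) (acc ++ [pvRecord (pvFidD inv) inv]),
          ih (PySem.Set.add seen (pvFidD inv)) ([] ++ [pvRecord (pvFidD inv) inv])]
      simp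

-- foldl of Set.add from an arbitrary start, in terms of dedup
theorem foldl_add_eq_append_filter (l : List String) (s : PySem.Set String) :
    l.foldl PySem.Set.add s = s ++ (PySem.List.dedup l).filter (fun y => !PySem.Set.contains s y) := by
  induction l generalizing s with
  | nil => simp [PySem.List.dedup, PySem.Set.ofList]
  | cons x l ih =>
    have hx1 : PySem.List.dedup (x :: l) = l.foldl PySem.Set.add [x] := by
      simp [PySem.List.dedup, PySem.Set.ofList, List.foldl_cons, PySem.Set.add, PySem.Set.contains, PySem.Set.empty]
    rw [List.foldl_cons, ih (PySem.Set.add s x), hx1, ih [x]]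
    by_cases hx : x ∈ s
    · have hadd : PySem.Set.add s x = s := by simp [PySem.Set.add, PySem.Set.contains, hx]
      rw [hadd]
      congr 1
      rw [List.filter_append, List.filter_filter]
      have h1 : List.filter (fun y => !PySem.Set.contains s y) [x] = [] := by
        simp [List.filter, PySem.Set.contains, hx]
      rw [h1, List.nil_append]
      apply List.filter_congr
      intro y _
      by_cases hy : y ∈ s
      · simp [PySem.Set.contains, hy]
      · have hyx : y ≠ x := fun h => hy (h ▸ hx)
        simp [PySem.Set.contains, hy, hyx]
    · have hadd : PySem.Set.add s x = s ++ [x] := by simp [PySem.Set.add, PySem.Set.contains, hx]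
      rw [hadd, List.append_assoc]
      congr 1
      rw [List.filter_append]
      have h1 : List.filter (fun y => !PySem.Set.contains s y) [x] = [x] := by
        simp [List.filter, PySem.Set.contains, hx]
      rw [h1, List.filter_filter]
      congr 1
      apply List.filter_congr
      intro y _
      by_cases hy : y ∈ s <;> by_cases hyx : y = x <;> simp [PySem.Set.contains, hy, hyx]

theorem dedup_cons (x : String) (l : List String) :
    PySem.List.dedup (x :: l) = x :: (PySem.List.dedup l).filter (fun y => !(y == x)) := by
  have hx1 : PySem.List.dedup (x :: l) = l.foldl PySem.Set.add [x] := by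
    simp [PySem.List.dedup, PySem.Set.ofList, List.foldl_cons, PySem.Set.add, PySem.Set.contains, PySem.Set.empty]
  rw [hx1, foldl_add_eq_append_filter]
  simp only [List.singleton_append, List.cons.injEq, true_and]
  apply List.filter_congr
  intro y _
  by_cases h : y = x <;> simp [PySem.Set.contains, h]

-- characterisation of A's loop: records for the unseen ids, in first-seen order, each from its first invoice
theorem pvGoA_char (rest : List (List (String × String))) (seen : PySem.Set String) :
    pvGoA rest seen [] =
      ((PySem.List.dedup (rest.map pvFidD)).filter (fun f => !PySem.Set.contains seen f)).map
        (fun fid => pvRecord fid ((rest.find? (fun inv => pvFidD inv == fid)).getD [])) := by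
  induction rest generalizing seen with
  | nil => simp [pvGoA, PySem.List.dedup, PySem.Set.ofList]
  | cons inv t ih =>
    simp only [pvGoA, List.map_cons, dedup_cons]
    by_cases h : pvFidD inv ∈ seen
    · have hc : PySem.Set.contains seen (pvFidD inv) = true := by simp [PySem.Set.contains, h]
      rw [if_pos hc, ih seen, List.filter_cons]
      have hb : (!PySem.Set.contains seen (pvFidD inv)) = false := by rw [hc]; rfl
      rw [hb, if_neg (by simp), List.filter_filter]
      have hfil : List.filter (fun a => (!PySem.Set.contains seen a) && !(a == pvFidD inv)) (PySem.List.dedup (t.map pvFidD))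
          = List.filter (fun a => !PySem.Set.contains seen a) (PySem.List.dedup (t.map pvFidD)) := by
        apply List.filter_congr
        intro y _
        by_cases hy : y ∈ seen
        · simp [PySem.Set.contains, hy]
        · have hyx : y ≠ pvFidD inv := fun he => hy (he ▸ h)
          simp [PySem.Set.contains, hy, hyx]
      rw [hfil]
      apply List.map_congr_left
      intro y hy
      have hys : y ∉ seen := by
        have := List.of_mem_filter hy
        simpa [PySem.Set.contains] using this
      have hyx : (pvFidD inv == y) = false := by
        have : y ≠ pvFidD inv := fun he => hys (he ▸ h)
        simp [beq_eq_false_iff_ne]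
        exact fun he => this he.symm
      rw [List.find?_cons, hyx]
    · have hc : PySem.Set.contains seen (pvFidD inv) = false := by simp [PySem.Set.contains, h]
      rw [if_neg (by rw [hc]; exact Bool.false_ne_true), pvGoA_acc, List.nil_append, ih (PySem.Set.add seen (pvFidD inv)), List.filter_cons]
      have hb : (!PySem.Set.contains seen (pvFidD inv)) = true := by rw [hc]; rfl
      rw [hb, if_pos rfl, List.map_cons, List.find?_cons]
      have hself : (pvFidD inv == pvFidD inv) = true := by simp
      rw [hself]
      simp only [Option.getD_some]
      rw [List.singleton_append]
      congr 1
      rw [List.filter_filter]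
      have hfil : List.filter (fun a => !PySem.Set.contains (PySem.Set.add seen (pvFidD inv)) a) (PySem.List.dedup (t.map pvFidD))
          = List.filter (fun a => (!PySem.Set.contains seen a) && !(a == pvFidD inv)) (PySem.List.dedup (t.map pvFidD)) := by
        apply List.filter_congr
        intro y _
        by_cases hy : y ∈ seen <;> by_cases hyx : y = pvFidD inv <;>
          simp [PySem.Set.add, PySem.Set.contains, hy, hyx, h]
      rw [hfil]
      apply List.map_congr_left
      intro y hy
      have hyx : (pvFidD inv == y) = false := by
        have := List.of_mem_filter hy
        have hne : ¬(y == pvFidD inv) = true := by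
          intro he
          simp [he] at this
        have : y ≠ pvFidD inv := by simpa using hne
        simp [beq_eq_false_iff_ne]
        exact fun he => this he.symm
      rw [List.find?_cons, hyx]

-- B's dict fold: last insert wins, so folding over the reversed list keeps each id's FIRST invoice
theorem foldl_insert_getD (l : List (List (String × String))) (d : PySem.Dict String (List (String × String))) (fid : String) :
    PySem.Dict.getD (l.foldl (fun d inv => PySem.Dict.insert d (pvFidD inv) inv) d) fid [] =
      match l.reverse.find? (fun inv => pvFidD inv == fid) with
      | some inv => inv
      | none => PySem.Dict.getD d fid [] := by
  induction l generalizing d with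
  | nil => simp
  | cons inv t ih =>
    rw [List.foldl_cons, ih, List.reverse_cons, List.find?_append]
    cases hf : t.reverse.find? (fun inv' => pvFidD inv' == fid) with
    | some i => simp
    | none =>
      by_cases he : pvFidD inv = fid
      · simp [List.find?, he]
      · have hb : (pvFidD inv == fid) = false := by simp [he]
        simp [List.find?, hb, PySem.Dict.getD_insert]
        exact fun hh => absurd hh.symm he

-- ===== VERDICT (by name: the statement is the Claim_ definition above) =====
theorem generate_facility_records_py_spec : Claim_equal_generate_facility_records_py := by
  intro invoices _ _
  unfold Spec_generate_facility_records_py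
  show pvGoA invoices PySem.Set.empty [] = generate_facility_records_py_alt invoices
  rw [pvGoA_char]
  simp only [generate_facility_records_py_alt]
  have hfil : (PySem.List.dedup (invoices.map pvFidD)).filter (fun f => !PySem.Set.contains PySem.Set.empty f)
      = PySem.List.dedup (invoices.map pvFidD) := by
    apply List.filter_eq_self.mpr
    intro y _
    simp [PySem.Set.contains, PySem.Set.empty]
  rw [hfil]
  apply List.map_congr_left
  intro fid hfid
  have hmem : fid ∈ invoices.map pvFidD := by
    rw [PySem.List.dedup_eq_ofList] at hfid
    exact (PySem.Set.mem_ofList _ _).mp hfid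
  rw [foldl_insert_getD, List.reverse_reverse]
  cases hf : invoices.find? (fun inv => pvFidD inv == fid) with
  | some inv => simp
  | none =>
    exfalso
    rcases List.mem_map.mp hmem with ⟨inv, hinv, hfidv⟩
    have := List.find?_eq_none.mp hf inv hinv
    simp [hfidv] at this
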